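-- pv_equiv track=rewrite | github.com/Tristan3002/Plot2CurveAnderson | p2c.py | per_sample_first_last
-- ===== SOURCE A (Python) =====
-- def per_sample_first_last(rows, use_adjusted: bool):
--     """Return dicts: first[sample], last[sample] using chosen F/OD field."""
--     first, last = {}, {}
--     for r in rows:
--         s = r['sample']
--         if s not in first or r['time_s'] < first[s]['time_s']:
--             first[s] = r
--         if s not in last or r['time_s'] > last[s]['time_s']:
--             last[s] = r
--     return first, last
-- ===== SOURCE B (Python) =====
-- def _earliest(g):
--     m = g[0]
--     for r in g[1:]:
--         if r['time_s'] < m['time_s']: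
--             m = r
--     return m
--
--
-- def _latest(g):
--     m = g[0]
--     for r in g[1:]:
--         if m['time_s'] < r['time_s']:
--             m = r
--     return m
--
--
-- def per_sample_first_last(rows, use_adjusted: bool):
--     """Return dicts: first[sample], last[sample] using chosen F/OD field."""
--     groups = {}
--     for r in rows:
--         groups.setdefault(r['sample'], []).append(r)
--     first = {s: _earliest(g) for s, g in groups.items()}
--     last = {s: _latest(g) for s, g in groups.items()}
--     return first, last
-- ===== Notes on version B (the rewrite author's own statement) =====
-- stated objective: alternative
-- what changed: A keeps running first/last dicts updated in one pass; B first builds a sample->rows grouping dict, then reduces each group with first-minimal/first-maximal selection by time_s.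
import Mathlib
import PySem

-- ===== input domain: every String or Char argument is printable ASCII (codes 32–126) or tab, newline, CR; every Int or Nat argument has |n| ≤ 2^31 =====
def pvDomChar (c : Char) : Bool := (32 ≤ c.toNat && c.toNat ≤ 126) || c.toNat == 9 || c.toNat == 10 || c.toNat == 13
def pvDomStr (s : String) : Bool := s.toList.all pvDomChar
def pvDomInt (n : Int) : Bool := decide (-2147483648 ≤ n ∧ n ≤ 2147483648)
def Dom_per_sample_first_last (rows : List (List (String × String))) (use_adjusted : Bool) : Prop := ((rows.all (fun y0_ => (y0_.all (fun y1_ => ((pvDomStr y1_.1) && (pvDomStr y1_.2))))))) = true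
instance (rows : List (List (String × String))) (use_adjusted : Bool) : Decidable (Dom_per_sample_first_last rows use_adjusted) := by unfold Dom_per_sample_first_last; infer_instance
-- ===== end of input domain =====

-- B replaces A's single pass with running first/last dicts by a group-then-reduce decomposition:
-- build a sample -> rows grouping dict, then reduce each group to its earliest/latest row (same cost, alternative structure).

-- ===== PORT A =====
-- r[k] for a row dict; the "" default is never reached under Pre_ (a missing key is a KeyError, excluded)
def rowGet (r : List (String × String)) (k : String) : String :=
  ((PySem.Dict.mk r).get? k).getD ""

-- the body of A's for-loop: update the running first/last dicts with row r
def stepA (st : PySem.Dict String (List (String × String)) × PySem.Dict String (List (String × String)))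
    (r : List (String × String)) :
    PySem.Dict String (List (String × String)) × PySem.Dict String (List (String × String)) :=
  let s := rowGet r "sample"
  (if st.1.contains s = false ∨ rowGet r "time_s" < rowGet (st.1.getD s []) "time_s"
     then st.1.insert s r else st.1,
   if st.2.contains s = false ∨ rowGet (st.2.getD s []) "time_s" < rowGet r "time_s"
     then st.2.insert s r else st.2)

def per_sample_first_last (rows : List (List (String × String))) (use_adjusted : Bool) :
    (List (String × List (String × String))) × (List (String × List (String × String))) :=
  let st := rows.foldl stepA (PySem.Dict.empty, PySem.Dict.empty)
  (st.1.items, st.2.items)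

-- ===== PORT B =====
-- the body of B's grouping loop: groups.setdefault(r['sample'], []).append(r)
def stepG (g : PySem.Dict String (List (List (String × String)))) (r : List (String × String)) :
    PySem.Dict String (List (List (String × String))) :=
  g.modify (rowGet r "sample") [] (· ++ [r])

-- _earliest(g): m = g[0]; scan g[1:].  ([] is unreachable: groups are nonempty; Python g[0] would raise)
def earliest (g : List (List (String × String))) : List (String × String) :=
  match g with
  | [] => []
  | x :: t => t.foldl (fun m r => if rowGet r "time_s" < rowGet m "time_s" then r else m) x

-- _latest(g): m = g[0]; scan g[1:]
def latest (g : List (List (String × String))) : List (String × String) :=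
  match g with
  | [] => []
  | x :: t => t.foldl (fun m r => if rowGet m "time_s" < rowGet r "time_s" then r else m) x

def per_sample_first_last_alt (rows : List (List (String × String))) (use_adjusted : Bool) :
    (List (String × List (String × String))) × (List (String × List (String × String))) :=
  let groups := rows.foldl stepG PySem.Dict.empty
  (groups.items.map (fun p => (p.1, earliest p.2)),
   groups.items.map (fun p => (p.1, latest p.2)))

-- ===== PRECONDITION & SPEC =====
-- Pre_ excludes exactly the inputs where A raises KeyError: a row without the 'sample' key, or a row
-- whose sample value occurs in more than one row but which lacks the 'time_s' key (a sample occurring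
-- in a single row never has its 'time_s' read, thanks to short-circuit evaluation).
def Pre_per_sample_first_last (rows : List (List (String × String))) (use_adjusted : Bool) : Prop :=
  ∀ r ∈ rows, (PySem.Dict.mk r).contains "sample" = true ∧
    (1 < rows.countP (fun r2 => rowGet r2 "sample" == rowGet r "sample") →
      (PySem.Dict.mk r).contains "time_s" = true)
instance (rows : List (List (String × String))) (use_adjusted : Bool) : Decidable (Pre_per_sample_first_last rows use_adjusted) := by unfold Pre_per_sample_first_last; infer_instance

def pvWitness_per_sample_first_last : (List (List (String × String))) × Bool :=
  ([[("sample", "a"), ("time_s", "1")], [("sample", "a"), ("time_s", "0")]], false)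

def Spec_per_sample_first_last (rows : List (List (String × String))) (use_adjusted : Bool) (out : (List (String × List (String × String))) × (List (String × List (String × String)))) : Prop := out = per_sample_first_last_alt rows use_adjusted
instance (rows : List (List (String × String))) (use_adjusted : Bool) (out : (List (String × List (String × String))) × (List (String × List (String × String)))) : Decidable (Spec_per_sample_first_last rows use_adjusted out) := by unfold Spec_per_sample_first_last; infer_instance

-- ===== CLAIM (what is proved, stated in full; the proofs are below) =====
def Claim_equal_per_sample_first_last : Prop := ∀ (rows : List (List (String × String))) (use_adjusted : Bool), Dom_per_sample_first_last rows use_adjusted → Pre_per_sample_first_last rows use_adjusted → Spec_per_sample_first_last rows use_adjusted (per_sample_first_last rows use_adjusted)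

-- ===== LEMMAS AND PROOFS =====

def timeOf (r : List (String × String)) : String := rowGet r "time_s"

-- map a function over the values of a dict, keeping keys and order
def mapVals (f : List (List (String × String)) → List (String × String))
    (d : PySem.Dict String (List (List (String × String)))) : PySem.Dict String (List (String × String)) :=
  PySem.Dict.mk (d.items.map (fun p => (p.1, f p.2)))

theorem mapVals_get? (f : List (List (String × String)) → List (String × String))
    (d : PySem.Dict String (List (List (String × String)))) (s : String) :
    (mapVals f d).get? s = (d.get? s).map f := by
  simp only [mapVals, PySem.Dict.get?]
  induction d.items with
  | nil => rfl
  | cons p t ih =>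
    simp only [List.map_cons, List.find?]
    by_cases h : (p.1 == s) = true
    · simp [h]
    · simp only [h]; simpa using ih

theorem mapVals_contains (f : List (List (String × String)) → List (String × String))
    (d : PySem.Dict String (List (List (String × String)))) (s : String) :
    (mapVals f d).contains s = d.contains s := by
  rw [PySem.Dict.contains_eq_isSome_get?, PySem.Dict.contains_eq_isSome_get?, mapVals_get?]
  cases d.get? s <;> rfl

theorem mapVals_getD (f : List (List (String × String)) → List (String × String))
    (d : PySem.Dict String (List (List (String × String)))) (s : String)
    {g : List (List (String × String))} (h : d.get? s = some g) :
    (mapVals f d).getD s [] = f g := by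
  rw [PySem.Dict.getD_eq_get?_getD, mapVals_get?, h]; rfl

theorem earliest_append (g : List (List (String × String))) (r : List (String × String))
    (h : g ≠ []) :
    earliest (g ++ [r]) = if timeOf r < timeOf (earliest g) then r else earliest g := by
  cases g with
  | nil => exact absurd rfl h
  | cons x t =>
    simp only [earliest, List.cons_append, List.foldl_append, List.foldl_cons, List.foldl_nil,
      timeOf]

theorem latest_append (g : List (List (String × String))) (r : List (String × String))
    (h : g ≠ []) :
    latest (g ++ [r]) = if timeOf (latest g) < timeOf r then r else latest g := by
  cases g with
  | nil => exact absurd rfl h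
  | cons x t =>
    simp only [latest, List.cons_append, List.foldl_append, List.foldl_cons, List.foldl_nil,
      timeOf]

-- the unique value at key s in a nodup-keys dict
theorem value_eq_of_mem_items (d : PySem.Dict String (List (List (String × String))))
    (hnd : d.keys.Nodup) {s : String} {g : List (List (String × String))}
    (hget : d.get? s = some g) {p : String × List (List (String × String))}
    (hp : p ∈ d.items) (hk : p.1 = s) : p.2 = g := by
  have := PySem.Dict.get?_of_mem_items (d := d) (k := p.1) (v := p.2) hp hnd
  rw [hk, hget] at this
  exact (Option.some_injective _ this).symm

theorem stepG_eq_insert (G : PySem.Dict String (List (List (String × String))))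
    (r : List (String × String)) :
    stepG G r = G.insert (rowGet r "sample") (G.getD (rowGet r "sample") [] ++ [r]) := by
  simp [stepG, PySem.Dict.modify]

theorem stepG_nodup (G : PySem.Dict String (List (List (String × String))))
    (r : List (String × String)) (hnd : G.keys.Nodup) : (stepG G r).keys.Nodup := by
  rw [stepG_eq_insert]; exact PySem.Dict.nodup_keys_insert _ _ _ hnd

theorem stepG_ne (G : PySem.Dict String (List (List (String × String))))
    (r : List (String × String)) (hne : ∀ p ∈ G.items, p.2 ≠ []) :
    ∀ p ∈ (stepG G r).items, p.2 ≠ [] := by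
  intro p hp
  rw [stepG_eq_insert] at hp
  rcases (PySem.Dict.mem_items_insert _ _ _ _).mp hp with h | ⟨h, _⟩
  · subst h; simp
  · exact hne p h

-- one A-step from the reduced state equals reducing after one grouping step (first component)
theorem stepA_fst (G : PySem.Dict String (List (List (String × String))))
    (r : List (String × String)) (hnd : G.keys.Nodup)
    (hne : ∀ p ∈ G.items, p.2 ≠ []) :
    (if (mapVals earliest G).contains (rowGet r "sample") = false ∨
        rowGet r "time_s" < rowGet ((mapVals earliest G).getD (rowGet r "sample") []) "time_s"
       then (mapVals earliest G).insert (rowGet r "sample") r else mapVals earliest G)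
      = mapVals earliest (stepG G r) := by
  set s := rowGet r "sample" with hs
  rw [stepG_eq_insert, ← hs]
  cases hget : G.get? s with
  | none =>
    have hc : G.contains s = false := by
      rw [PySem.Dict.contains_eq_isSome_get?, hget]; rfl
    have hgd : G.getD s [] = [] := by
      rw [PySem.Dict.getD_eq_get?_getD, hget]; rfl
    rw [hgd]
    simp only [mapVals_contains, hc, true_or, if_pos]
    apply PySem.Dict.ext
    rw [PySem.Dict.items_insert_of_not_contains _ _ (by rw [mapVals_contains]; exact hc)]
    rw [show (mapVals earliest (G.insert s ([] ++ [r]))).items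
          = (G.insert s [r]).items.map (fun p => (p.1, earliest p.2)) from rfl]
    rw [PySem.Dict.items_insert_of_not_contains _ _ hc, List.map_append]
    rfl
  | some g =>
    have hc : G.contains s = true := by
      rw [PySem.Dict.contains_eq_isSome_get?, hget]; rfl
    have hgd : G.getD s [] = g := by
      rw [PySem.Dict.getD_eq_get?_getD, hget]; rfl
    have hgne : g ≠ [] := hne (s, g) (PySem.Dict.mem_items_of_get?_eq_some _ hget)
    have hFgd : (mapVals earliest G).getD s [] = earliest g := mapVals_getD _ _ _ hget
    have hnewv : earliest (g ++ [r]) = if timeOf r < timeOf (earliest g) then r else earliest g :=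
      earliest_append g r hgne
    have hFc : (mapVals earliest G).contains s = true := by rw [mapVals_contains]; exact hc
    rw [hgd, hFgd, hFc]
    simp only [Bool.true_eq_false, false_or]
    show (if timeOf r < timeOf (earliest g) then (mapVals earliest G).insert s r
          else mapVals earliest G) = mapVals earliest (G.insert s (g ++ [r]))
    have hitems : (mapVals earliest (G.insert s (g ++ [r]))).items
        = G.items.map (fun p => if p.1 = s then (s, earliest (g ++ [r])) else (p.1, earliest p.2)) := by
      rw [show (mapVals earliest (G.insert s (g ++ [r]))).items
            = (G.insert s (g ++ [r])).items.map (fun p => (p.1, earliest p.2)) from rfl]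
      rw [PySem.Dict.items_insert_of_contains _ _ hc, List.map_map]
      apply List.map_congr_left
      intro p _
      by_cases h : p.1 = s
      · simp [h]
      · simp [h]
    split
    next hlt =>
      apply PySem.Dict.ext
      rw [PySem.Dict.items_insert_of_contains _ _ hFc, hitems]
      rw [show (mapVals earliest G).items = G.items.map (fun p => (p.1, earliest p.2)) from rfl,
        List.map_map]
      apply List.map_congr_left
      intro p _
      by_cases h : p.1 = s
      · have hmm : earliest (g ++ [r]) = r := by rw [hnewv, if_pos hlt]
        simp [h, hmm]
      · simp [h]
    next hlt =>
      apply PySem.Dict.ext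
      rw [hitems]
      rw [show (mapVals earliest G).items = G.items.map (fun p => (p.1, earliest p.2)) from rfl]
      apply List.map_congr_left
      intro p hp
      by_cases h : p.1 = s
      · have hval : p.2 = g := value_eq_of_mem_items G hnd hget hp h
        have hmm : earliest (g ++ [r]) = earliest g := by rw [hnewv, if_neg hlt]
        simp [h, hval, hmm]
      · simp [h]

-- same for the last/latest component
theorem stepA_snd (G : PySem.Dict String (List (List (String × String))))
    (r : List (String × String)) (hnd : G.keys.Nodup)
    (hne : ∀ p ∈ G.items, p.2 ≠ []) :
    (if (mapVals latest G).contains (rowGet r "sample") = false ∨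
        rowGet ((mapVals latest G).getD (rowGet r "sample") []) "time_s" < rowGet r "time_s"
       then (mapVals latest G).insert (rowGet r "sample") r else mapVals latest G)
      = mapVals latest (stepG G r) := by
  set s := rowGet r "sample" with hs
  rw [stepG_eq_insert, ← hs]
  cases hget : G.get? s with
  | none =>
    have hc : G.contains s = false := by
      rw [PySem.Dict.contains_eq_isSome_get?, hget]; rfl
    have hgd : G.getD s [] = [] := by
      rw [PySem.Dict.getD_eq_get?_getD, hget]; rfl
    rw [hgd]
    simp only [mapVals_contains, hc, true_or, if_pos]
    apply PySem.Dict.ext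
    rw [PySem.Dict.items_insert_of_not_contains _ _ (by rw [mapVals_contains]; exact hc)]
    rw [show (mapVals latest (G.insert s ([] ++ [r]))).items
          = (G.insert s [r]).items.map (fun p => (p.1, latest p.2)) from rfl]
    rw [PySem.Dict.items_insert_of_not_contains _ _ hc, List.map_append]
    rfl
  | some g =>
    have hc : G.contains s = true := by
      rw [PySem.Dict.contains_eq_isSome_get?, hget]; rfl
    have hgd : G.getD s [] = g := by
      rw [PySem.Dict.getD_eq_get?_getD, hget]; rfl
    have hgne : g ≠ [] := hne (s, g) (PySem.Dict.mem_items_of_get?_eq_some _ hget)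
    have hFgd : (mapVals latest G).getD s [] = latest g := mapVals_getD _ _ _ hget
    have hnewv : latest (g ++ [r]) = if timeOf (latest g) < timeOf r then r else latest g :=
      latest_append g r hgne
    have hFc : (mapVals latest G).contains s = true := by rw [mapVals_contains]; exact hc
    rw [hgd, hFgd, hFc]
    simp only [Bool.true_eq_false, false_or]
    show (if timeOf (latest g) < timeOf r then (mapVals latest G).insert s r
          else mapVals latest G) = mapVals latest (G.insert s (g ++ [r]))
    have hitems : (mapVals latest (G.insert s (g ++ [r]))).items
        = G.items.map (fun p => if p.1 = s then (s, latest (g ++ [r])) else (p.1, latest p.2)) := by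
      rw [show (mapVals latest (G.insert s (g ++ [r]))).items
            = (G.insert s (g ++ [r])).items.map (fun p => (p.1, latest p.2)) from rfl]
      rw [PySem.Dict.items_insert_of_contains _ _ hc, List.map_map]
      apply List.map_congr_left
      intro p _
      by_cases h : p.1 = s
      · simp [h]
      · simp [h]
    split
    next hlt =>
      apply PySem.Dict.ext
      rw [PySem.Dict.items_insert_of_contains _ _ hFc, hitems]
      rw [show (mapVals latest G).items = G.items.map (fun p => (p.1, latest p.2)) from rfl,
        List.map_map]
      apply List.map_congr_left
      intro p _
      by_cases h : p.1 = s
      · have hmm : latest (g ++ [r]) = r := by rw [hnewv, if_pos hlt]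
        simp [h, hmm]
      · simp [h]
    next hlt =>
      apply PySem.Dict.ext
      rw [hitems]
      rw [show (mapVals latest G).items = G.items.map (fun p => (p.1, latest p.2)) from rfl]
      apply List.map_congr_left
      intro p hp
      by_cases h : p.1 = s
      · have hval : p.2 = g := value_eq_of_mem_items G hnd hget hp h
        have hmm : latest (g ++ [r]) = latest g := by rw [hnewv, if_neg hlt]
        simp [h, hval, hmm]
      · simp [h]

-- the loop invariant: folding A's step from the reduced dicts equals reducing after grouping
theorem fold_invariant (rows : List (List (String × String)))
    (G : PySem.Dict String (List (List (String × String)))) (hnd : G.keys.Nodup)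
    (hne : ∀ p ∈ G.items, p.2 ≠ []) :
    rows.foldl stepA (mapVals earliest G, mapVals latest G) =
      (mapVals earliest (rows.foldl stepG G), mapVals latest (rows.foldl stepG G)) := by
  induction rows generalizing G with
  | nil => rfl
  | cons r t ih =>
    simp only [List.foldl_cons]
    have hstep : stepA (mapVals earliest G, mapVals latest G) r
        = (mapVals earliest (stepG G r), mapVals latest (stepG G r)) := by
      simp only [stepA]
      exact Prod.ext (stepA_fst G r hnd hne) (stepA_snd G r hnd hne)
    rw [hstep]
    exact ih (stepG G r) (stepG_nodup G r hnd) (stepG_ne G r hne)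

-- ===== VERDICT (by name: the statement is the Claim_ definition above) =====
theorem per_sample_first_last_spec : Claim_equal_per_sample_first_last := by
  intro rows ua _ _
  unfold Spec_per_sample_first_last per_sample_first_last per_sample_first_last_alt
  have h := fold_invariant rows PySem.Dict.empty (by simp [PySem.Dict.empty, PySem.Dict.keys])
    (by intro p hp; simp [PySem.Dict.empty] at hp)
  have he : (mapVals earliest PySem.Dict.empty, mapVals latest PySem.Dict.empty)
      = ((PySem.Dict.empty : PySem.Dict String (List (String × String))), PySem.Dict.empty) := rfl
  rw [he] at h
  rw [h]
  rfl
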